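-- pv_equiv track=rewrite | github.com/zhhongsh/StablePose | lib/network_noid.py | get_idx
-- ===== SOURCE A (Python) =====
-- rot_obj_idx = [1 - 1, 2 - 1, 3 - 1, 4 - 1, 13 - 1, 14 - 1, 15 - 1, 16 - 1, 17 - 1, 24 - 1, 30 - 1]
--
-- nosym_oobj_idx = [18 - 1, 21 - 1, 22 - 1]
--
-- def get_idx(obj_id):
--     st_idx = 0
--     for i in range(obj_id):
--         if i in nosym_oobj_idx:
--             st_idx += 4
--         elif i in rot_obj_idx:
--             st_idx += 3
--         else:
--             st_idx += 4 * 3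
--     if obj_id in nosym_oobj_idx:
--         end_idx = st_idx + 4
--     elif obj_id in rot_obj_idx:
--         end_idx = st_idx + 3
--     else:
--         end_idx = st_idx + 4 * 3
--     return st_idx, end_idx
-- ===== SOURCE B (Python) =====
-- ROT = [0, 1, 2, 3, 12, 13, 14, 15, 16, 23, 29]      # sorted; same members as rot_obj_idx
-- NOSYM = [17, 20, 21]                                # sorted; same members as nosym_oobj_idx
--
-- def get_idx(obj_id):
--     # closed form: count special indices below obj_id instead of looping over range(obj_id)
--     n = obj_id if obj_id > 0 else 0
--     cn = sum(1 for x in NOSYM if x < n)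
--     cr = sum(1 for x in ROT if x < n)
--     st_idx = 4 * cn + 3 * cr + 12 * (n - cn - cr)
--     width = 4 if obj_id in NOSYM else 3 if obj_id in ROT else 12
--     return st_idx, st_idx + width
-- ===== Notes on version B (the rewrite author's own statement) =====
-- stated objective: faster
-- what changed: Replaced the O(obj_id) loop over range(obj_id) with a closed-form formula that counts the constant special indices below obj_id and multiplies.
import Mathlib
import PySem

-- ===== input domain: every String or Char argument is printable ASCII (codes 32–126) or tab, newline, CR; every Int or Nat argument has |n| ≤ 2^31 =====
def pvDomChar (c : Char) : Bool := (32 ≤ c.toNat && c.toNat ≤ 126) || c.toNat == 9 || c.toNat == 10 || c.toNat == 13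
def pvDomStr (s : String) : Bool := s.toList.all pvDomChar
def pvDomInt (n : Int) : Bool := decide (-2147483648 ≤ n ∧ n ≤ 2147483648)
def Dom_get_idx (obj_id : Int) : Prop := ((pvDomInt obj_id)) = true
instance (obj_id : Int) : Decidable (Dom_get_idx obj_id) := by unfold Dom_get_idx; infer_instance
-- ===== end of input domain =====

-- B replaces A's O(obj_id) loop by a closed-form count of the special indices below obj_id (objective: faster).

-- ===== PORT A =====
def rot_obj_idx : List Int := [1 - 1, 2 - 1, 3 - 1, 4 - 1, 13 - 1, 14 - 1, 15 - 1, 16 - 1, 17 - 1, 24 - 1, 30 - 1]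
def nosym_oobj_idx : List Int := [18 - 1, 21 - 1, 22 - 1]

def get_idx (obj_id : Int) : List Int :=
  let st_idx := (PySem.List.pyRange 0 obj_id 1).foldl
    (fun st i =>
      if i ∈ nosym_oobj_idx then st + 4
      else if i ∈ rot_obj_idx then st + 3
      else st + 4 * 3) 0
  let end_idx :=
    if obj_id ∈ nosym_oobj_idx then st_idx + 4
    else if obj_id ∈ rot_obj_idx then st_idx + 3
    else st_idx + 4 * 3
  [st_idx, end_idx]

-- ===== PORT B =====
def rotB : List Int := [0, 1, 2, 3, 12, 13, 14, 15, 16, 23, 29]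
def nosymB : List Int := [17, 20, 21]

def get_idx_alt (obj_id : Int) : List Int :=
  let n := if obj_id > 0 then obj_id else 0
  let cn : Int := (nosymB.filter (fun x => x < n)).length
  let cr : Int := (rotB.filter (fun x => x < n)).length
  let st_idx := 4 * cn + 3 * cr + 12 * (n - cn - cr)
  let width : Int := if obj_id ∈ nosymB then 4 else if obj_id ∈ rotB then 3 else 12
  [st_idx, st_idx + width]

-- ===== PRECONDITION & SPEC =====
def Spec_get_idx (obj_id : Int) (out : List Int) : Prop := out = get_idx_alt obj_id
instance (obj_id : Int) (out : List Int) : Decidable (Spec_get_idx obj_id out) := by unfold Spec_get_idx; infer_instance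

-- ===== CLAIM (what is proved, stated in full; the proofs are below) =====
def Claim_equal_get_idx : Prop := ∀ (obj_id : Int), Dom_get_idx obj_id → Spec_get_idx obj_id (get_idx obj_id)

-- ===== LEMMAS AND PROOFS =====

/-- The per-index increment of A's loop, as a function. -/
def pvStep (i : Int) : Int :=
  if i ∈ nosym_oobj_idx then 4 else if i ∈ rot_obj_idx then 3 else 4 * 3

lemma foldl_eq_sum (l : List Int) : ∀ s : Int,
    l.foldl (fun st i =>
      if i ∈ nosym_oobj_idx then st + 4
      else if i ∈ rot_obj_idx then st + 3
      else st + 4 * 3) s = s + (l.map pvStep).sum := by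
  induction l with
  | nil => intro s; simp
  | cons a t ih =>
    intro s
    simp only [List.foldl_cons, List.map_cons, List.sum_cons, ih]
    unfold pvStep; split_ifs <;> ring

lemma sum_step_ge (j : Nat) :
    ((PySem.List.pyRange 0 (30 + (j : Int)) 1).map pvStep).sum = 237 + 12 * j := by
  induction j with
  | zero => decide
  | succ n ih =>
    have h : (30 + ((n + 1 : Nat) : Int)) = (30 + (n : Int)) + 1 := by push_cast; ring
    rw [h, PySem.List.pyRange_one_succ_right (by positivity)]
    have hmem : pvStep (30 + (n : Int)) = 12 := by
      have a1 : (30 + (n : Int)) ∉ nosym_oobj_idx := by simp [nosym_oobj_idx]; omega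
      have a2 : (30 + (n : Int)) ∉ rot_obj_idx := by simp [rot_obj_idx]; omega
      unfold pvStep
      rw [if_neg a1, if_neg a2]; norm_num
    simp [List.sum_append, ih, hmem]
    ring

lemma get_idx_eq_ge (obj_id : Int) (h : 30 ≤ obj_id) :
    get_idx obj_id = get_idx_alt obj_id := by
  obtain ⟨j, hj⟩ : ∃ j : Nat, obj_id = 30 + (j : Int) :=
    ⟨(obj_id - 30).toNat, by omega⟩
  have hnn : obj_id ∉ nosym_oobj_idx := by simp [nosym_oobj_idx]; omega
  have hnr : obj_id ∉ rot_obj_idx := by simp [rot_obj_idx]; omega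
  have hnnB : obj_id ∉ nosymB := by simp [nosymB]; omega
  have hnrB : obj_id ∉ rotB := by simp [rotB]; omega
  have hfn : nosymB.filter (fun x => x < obj_id) = nosymB := by
    apply List.filter_eq_self.mpr
    intro x hx
    simp only [nosymB, List.mem_cons, List.not_mem_nil, or_false] at hx
    simp only [decide_eq_true_eq]
    rcases hx with h1 | h1 | h1 <;> omega
  have hfr : rotB.filter (fun x => x < obj_id) = rotB := by
    apply List.filter_eq_self.mpr
    intro x hx
    simp only [rotB, List.mem_cons, List.not_mem_nil, or_false] at hx
    simp only [decide_eq_true_eq]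
    rcases hx with h1 | h1 | h1 | h1 | h1 | h1 | h1 | h1 | h1 | h1 | h1 <;> omega
  have hA : get_idx obj_id =
      [237 + 12 * (j : Int), 237 + 12 * (j : Int) + 12] := by
    simp only [get_idx, foldl_eq_sum, if_neg hnn, if_neg hnr]
    rw [hj, sum_step_ge]
    norm_num
  have hB : get_idx_alt obj_id =
      [237 + 12 * (j : Int), 237 + 12 * (j : Int) + 12] := by
    simp only [get_idx_alt, if_pos (show obj_id > 0 by omega), hfn, hfr,
      if_neg hnnB, if_neg hnrB]
    simp only [nosymB, rotB, List.length_cons, List.length_nil]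
    norm_num
    omega
  rw [hA, hB]

lemma get_idx_eq_neg (obj_id : Int) (h : obj_id < 0) :
    get_idx obj_id = get_idx_alt obj_id := by
  have hnn : obj_id ∉ nosym_oobj_idx := by simp [nosym_oobj_idx]; omega
  have hnr : obj_id ∉ rot_obj_idx := by simp [rot_obj_idx]; omega
  have hnnB : obj_id ∉ nosymB := by simp [nosymB]; omega
  have hnrB : obj_id ∉ rotB := by simp [rotB]; omega
  have hA : get_idx obj_id = [0, 12] := by
    simp [get_idx, PySem.List.pyRange_one_eq_nil (by omega : obj_id ≤ 0),
      if_neg hnn, if_neg hnr]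
  have hB : get_idx_alt obj_id = [0, 12] := by
    have h0 : ¬ obj_id > 0 := by omega
    simp only [get_idx_alt, if_neg h0, if_neg hnnB, if_neg hnrB]
    decide
  rw [hA, hB]

-- ===== VERDICT (by name: the statement is the Claim_ definition above) =====
theorem get_idx_spec : Claim_equal_get_idx := by
  intro obj_id _
  unfold Spec_get_idx
  by_cases h1 : obj_id < 0
  · exact get_idx_eq_neg obj_id h1
  · by_cases h2 : obj_id < 30
    · have h0 : 0 ≤ obj_id := by omega
      interval_cases obj_id <;> decide
    · exact get_idx_eq_ge obj_id (by omega)
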